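-- pv_equiv track=rewrite | github.com/mahroonoohi/Bachelor-of-Computer-Engineering | BachelorTthesis/Algorithm_visualization/Binary_Tree/Searching/main.py | generate_latex_document_steps
-- ===== SOURCE A (Python) =====
-- def generate_latex_document_steps(steps):
--     latex_code = r"""
-- \documentclass[10pt,a4paper]{article}
-- \usepackage[T1]{fontenc}
-- \usepackage{tikz}
-- \usepackage[margin=1cm]{geometry}
-- \begin{document}
--
-- % Explanation about the algorithm
-- \section*{Binary Tree Search Algorithm}
-- In this document, we illustrate the process of searching for a value in a binary tree. The search algorithm is a depth-first search (DFS) using recursion, and it operates as follows: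
--
-- \begin{enumerate}
--     \item \textbf{Start at the Root:}
--     Begin the search at the root of the binary tree.
--
--     \item \textbf{Check Current Node:}
--     Compare the value of the current node with the target value. If they match, the search is successful.
--
--     \item \textbf{Recursive Search:}
--     If the current node's value does not match the target, recursively search the left and right subtrees. This is done by calling the search function on the left child and then on the right child.
--
--     \item \textbf{Highlighting Nodes:}
--     During the search process, nodes being visited are highlighted to show their role in the search. If the target node is found, it is highlighted in purple.
--
--     \item \textbf{End of Search:}
--     The search concludes when the target value is found or all nodes have been visited. If the target is not found after traversing the entire tree, the search concludes with a failure.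
-- \end{enumerate}
--
-- % Detailed Steps
-- \section*{Detailed Steps}
-- The following figures illustrate the binary tree at various stages of the search process. Each figure shows the state of the tree at different points during the search operation.
--
-- """
--
--     for i in range(0, len(steps), 6):
--         latex_code += r"""
-- \begin{figure}[h!]
-- \centering
-- """
--         for j in range(i, min(i + 6, len(steps))):
--             latex_code += r"""
-- \begin{minipage}{0.8\textwidth}
--     \centering
--     \begin{tikzpicture}[level distance=10mm]
--         \tikzstyle{every node}=[fill=green!75,circle,inner sep=1pt, minimum size=8mm]
--         \tikzstyle{level 1}=[sibling distance=25mm, set style={{every node}+=[fill=green!60]}]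
--         \tikzstyle{level 2}=[sibling distance=20mm, set style={{every node}+=[fill=green!45]}]
--         \tikzstyle{level 3}=[sibling distance=15mm, set style={{every node}+=[fill=green!30]}]
--         \tikzstyle{level 4}=[sibling distance=10mm, set style={{every node}+=[fill=green!15]}]
--         """ + steps[j] + ";" + r"""
--     \end{tikzpicture}
--     \caption{Step """ + str(j + 1) + r"""}
-- \end{minipage}
-- \vspace{1cm}
-- """
--
--         latex_code += r"""
-- \end{figure}
-- \newpage
-- """
--
--     latex_code += r"""
-- \end{document}
-- """
--     return latex_code
-- ===== SOURCE B (Python) =====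
-- # B: one flat loop over indices with modulo-6 figure boundaries, collecting
-- # parts in a list and joining once, instead of A's nested chunk loops with
-- # repeated string concatenation.
--
-- _HEADER = r"""
-- \documentclass[10pt,a4paper]{article}
-- \usepackage[T1]{fontenc}
-- \usepackage{tikz}
-- \usepackage[margin=1cm]{geometry}
-- \begin{document}
--
-- % Explanation about the algorithm
-- \section*{Binary Tree Search Algorithm}
-- In this document, we illustrate the process of searching for a value in a binary tree. The search algorithm is a depth-first search (DFS) using recursion, and it operates as follows:
--
-- \begin{enumerate}
--     \item \textbf{Start at the Root:}
--     Begin the search at the root of the binary tree.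
--
--     \item \textbf{Check Current Node:}
--     Compare the value of the current node with the target value. If they match, the search is successful.
--
--     \item \textbf{Recursive Search:}
--     If the current node's value does not match the target, recursively search the left and right subtrees. This is done by calling the search function on the left child and then on the right child.
--
--     \item \textbf{Highlighting Nodes:}
--     During the search process, nodes being visited are highlighted to show their role in the search. If the target node is found, it is highlighted in purple.
--
--     \item \textbf{End of Search:}
--     The search concludes when the target value is found or all nodes have been visited. If the target is not found after traversing the entire tree, the search concludes with a failure.
-- \end{enumerate}
--
-- % Detailed Steps
-- \section*{Detailed Steps}
-- The following figures illustrate the binary tree at various stages of the search process. Each figure shows the state of the tree at different points during the search operation.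
--
-- """
--
-- _FIG_OPEN = r"""
-- \begin{figure}[h!]
-- \centering
-- """
--
-- _MINI_PRE = r"""
-- \begin{minipage}{0.8\textwidth}
--     \centering
--     \begin{tikzpicture}[level distance=10mm]
--         \tikzstyle{every node}=[fill=green!75,circle,inner sep=1pt, minimum size=8mm]
--         \tikzstyle{level 1}=[sibling distance=25mm, set style={{every node}+=[fill=green!60]}]
--         \tikzstyle{level 2}=[sibling distance=20mm, set style={{every node}+=[fill=green!45]}]
--         \tikzstyle{level 3}=[sibling distance=15mm, set style={{every node}+=[fill=green!30]}]
--         \tikzstyle{level 4}=[sibling distance=10mm, set style={{every node}+=[fill=green!15]}]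
--         """
--
-- _MINI_MID = ";" + r"""
--     \end{tikzpicture}
--     \caption{Step """
--
-- _MINI_POST = r"""}
-- \end{minipage}
-- \vspace{1cm}
-- """
--
-- _FIG_CLOSE = r"""
-- \end{figure}
-- \newpage
-- """
--
-- _FOOTER = r"""
-- \end{document}
-- """
--
--
-- def generate_latex_document_steps(steps):
--     n = len(steps)
--     parts = [_HEADER]
--     for j in range(n):
--         if j % 6 == 0:
--             parts.append(_FIG_OPEN)
--         parts.append(_MINI_PRE + steps[j] + _MINI_MID + str(j + 1) + _MINI_POST)
--         if j % 6 == 5 or j == n - 1: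
--             parts.append(_FIG_CLOSE)
--     parts.append(_FOOTER)
--     return "".join(parts)
-- ===== Notes on version B (the rewrite author's own statement) =====
-- stated objective: idiomatic
-- what changed: Replaces A's nested chunk loops (outer over range(0,len,6), inner over each chunk) that grow one string by repeated concatenation with a single flat loop over all indices that emits the figure-open piece when j%6==0 and the figure-close piece when j%6==5 or j is last, collecting the pieces in a list joined once at the end.
import Mathlib
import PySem

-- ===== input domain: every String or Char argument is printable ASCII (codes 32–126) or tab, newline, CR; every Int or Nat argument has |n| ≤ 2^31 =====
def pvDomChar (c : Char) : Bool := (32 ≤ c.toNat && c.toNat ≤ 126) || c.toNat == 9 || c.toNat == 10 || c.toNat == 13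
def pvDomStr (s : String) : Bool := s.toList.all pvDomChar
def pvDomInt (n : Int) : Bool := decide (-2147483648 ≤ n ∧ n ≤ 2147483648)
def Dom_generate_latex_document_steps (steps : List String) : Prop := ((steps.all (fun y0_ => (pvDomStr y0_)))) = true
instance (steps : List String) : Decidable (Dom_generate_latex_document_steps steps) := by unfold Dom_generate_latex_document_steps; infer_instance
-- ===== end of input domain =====

-- B rebuilds the same document with one flat modulo-6 loop joining collected parts (idiomatic; same cost as A).
-- ===== PORT A =====
-- Port of A: nested loops — outer over chunk starts range(0, len, 6), inner over the
-- chunk's indices — accumulating one big string by repeated concatenation.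
def pvHeader : String := "\n\\documentclass[10pt,a4paper]{article}\n\\usepackage[T1]{fontenc}\n\\usepackage{tikz}\n\\usepackage[margin=1cm]{geometry}\n\\begin{document}\n\n% Explanation about the algorithm\n\\section*{Binary Tree Search Algorithm}\nIn this document, we illustrate the process of searching for a value in a binary tree. The search algorithm is a depth-first search (DFS) using recursion, and it operates as follows:\n\n\\begin{enumerate}\n    \\item \\textbf{Start at the Root:}\n    Begin the search at the root of the binary tree.\n    \n    \\item \\textbf{Check Current Node:}\n    Compare the value of the current node with the target value. If they match, the search is successful.\n\n    \\item \\textbf{Recursive Search:}\n    If the current node's value does not match the target, recursively search the left and right subtrees. This is done by calling the search function on the left child and then on the right child.\n\n    \\item \\textbf{Highlighting Nodes:}\n    During the search process, nodes being visited are highlighted to show their role in the search. If the target node is found, it is highlighted in purple.\n\n    \\item \\textbf{End of Search:}\n    The search concludes when the target value is found or all nodes have been visited. If the target is not found after traversing the entire tree, the search concludes with a failure.\n\\end{enumerate}\n\n% Detailed Steps\n\\section*{Detailed Steps}\nThe following figures illustrate the binary tree at various stages of the search process. Each figure shows the state of the tree at different points during the search operation.\n\n"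
def pvFigOpen : String := "\n\\begin{figure}[h!]\n\\centering\n"
def pvMiniPre : String := "\n\\begin{minipage}{0.8\\textwidth}\n    \\centering\n    \\begin{tikzpicture}[level distance=10mm]\n        \\tikzstyle{every node}=[fill=green!75,circle,inner sep=1pt, minimum size=8mm]\n        \\tikzstyle{level 1}=[sibling distance=25mm, set style={{every node}+=[fill=green!60]}]\n        \\tikzstyle{level 2}=[sibling distance=20mm, set style={{every node}+=[fill=green!45]}]\n        \\tikzstyle{level 3}=[sibling distance=15mm, set style={{every node}+=[fill=green!30]}]\n        \\tikzstyle{level 4}=[sibling distance=10mm, set style={{every node}+=[fill=green!15]}]\n        "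
def pvMiniMid : String := "\n    \\end{tikzpicture}\n    \\caption{Step "
def pvMiniPost : String := "}\n\\end{minipage}\n\\vspace{1cm}\n"
def pvFigClose : String := "\n\\end{figure}\n\\newpage\n"
def pvFooter : String := "\n\\end{document}\n"

def generate_latex_document_steps (steps : List String) : String :=
  let latex_code := pvHeader
  let latex_code := (PySem.List.pyRange 0 (PySem.List.len steps) 6).foldl
    (fun acc i =>
      let acc := acc ++ pvFigOpen
      let acc := (PySem.List.pyRange i (min (i + 6) (PySem.List.len steps)) 1).foldl
        (fun acc2 j =>
          acc2 ++ pvMiniPre ++ PySem.List.pyGetD steps j "" ++ ";" ++ pvMiniMid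
            ++ PySem.Int.toStr (j + 1) ++ pvMiniPost) acc
      acc ++ pvFigClose) latex_code
  latex_code ++ pvFooter

-- ===== PORT B =====
-- Port of B: one flat loop over range(len(steps)) with modulo-6 figure boundaries,
-- collecting the pieces in a list and joining once at the end.
def pvMiniMidB : String := ";" ++ pvMiniMid

def generate_latex_document_steps_alt (steps : List String) : String :=
  let n := PySem.List.len steps
  let parts : List String := [pvHeader]
  let parts := (PySem.List.pyRange 0 n 1).foldl
    (fun parts j =>
      let parts := if PySem.Int.mod j 6 = 0 then parts ++ [pvFigOpen] else parts
      let parts := parts ++ [pvMiniPre ++ PySem.List.pyGetD steps j "" ++ pvMiniMidB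
                              ++ PySem.Int.toStr (j + 1) ++ pvMiniPost]
      if PySem.Int.mod j 6 = 5 ∨ j = n - 1 then parts ++ [pvFigClose] else parts) parts
  PySem.Str.join "" (parts ++ [pvFooter])

-- ===== PRECONDITION & SPEC =====
def Spec_generate_latex_document_steps (steps : List String) (out : String) : Prop := out = generate_latex_document_steps_alt steps
instance (steps : List String) (out : String) : Decidable (Spec_generate_latex_document_steps steps out) := by unfold Spec_generate_latex_document_steps; infer_instance

-- ===== CLAIM (what is proved, stated in full; the proofs are below) =====
def Claim_equal_generate_latex_document_steps : Prop := ∀ (steps : List String), Dom_generate_latex_document_steps steps → Spec_generate_latex_document_steps steps (generate_latex_document_steps steps)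

-- ===== LEMMAS AND PROOFS =====

/-- Concatenation of a list of strings. -/
def sCat : List String → String
  | [] => ""
  | s :: r => s ++ sCat r

theorem sCat_append (a b : List String) : sCat (a ++ b) = sCat a ++ sCat b := by
  induction a with
  | nil => simp [sCat]
  | cons x r ih => simp [sCat, ih, String.append_assoc]

theorem join_empty_eq_sCat (l : List String) : PySem.Str.join "" l = sCat l := by
  have key : ∀ l : List String, PySem.Chars.join [] (l.map String.toList) = (sCat l).toList := by
    intro l
    induction l with
    | nil => simp [sCat, PySem.Chars.join_nil]
    | cons s r ih =>
      cases r with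
      | nil => simp [sCat, PySem.Chars.join_singleton]
      | cons t r2 =>
        rw [List.map_cons, List.map_cons, PySem.Chars.join_cons_cons]
        have ih2 : PySem.Chars.join [] (t.toList :: r2.map String.toList)
            = (sCat (t :: r2)).toList := by simpa using ih
        simp [sCat, ih2, String.toList_append]
  simp only [PySem.Str.join, show ("" : String).toList = [] from rfl, key l]
  exact String.ofList_toList

/-- One minipage block, as both programs build it. -/
def pvMini (steps : List String) (j : Int) : String :=
  pvMiniPre ++ PySem.List.pyGetD steps j "" ++ ";" ++ pvMiniMid
    ++ PySem.Int.toStr (j + 1) ++ pvMiniPost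

/-- One figure environment of A, for the chunk starting at i. -/
def pvChunk (steps : List String) (n i : Int) : String :=
  pvFigOpen ++ sCat ((PySem.List.pyRange i (min (i + 6) n) 1).map (pvMini steps)) ++ pvFigClose

/-- The pieces B emits for index j. -/
def pvG (steps : List String) (n j : Int) : List String :=
  (if PySem.Int.mod j 6 = 0 then [pvFigOpen] else [])
    ++ [pvMini steps j]
    ++ (if PySem.Int.mod j 6 = 5 ∨ j = n - 1 then [pvFigClose] else [])

theorem pvG_open (steps : List String) (n j : Int) (hm : PySem.Int.mod j 6 = 0)
    (hne : j ≠ n - 1) : pvG steps n j = [pvFigOpen, pvMini steps j] := by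
  unfold pvG; rw [if_pos hm, if_neg (fun h => h.elim (by rw [hm]; decide) hne)]; rfl

theorem pvG_open_close (steps : List String) (n j : Int) (hm : PySem.Int.mod j 6 = 0)
    (heq : j = n - 1) : pvG steps n j = [pvFigOpen, pvMini steps j, pvFigClose] := by
  unfold pvG; rw [if_pos hm, if_pos (Or.inr heq)]; rfl

theorem pvG_mid (steps : List String) (n j : Int) (hm0 : PySem.Int.mod j 6 ≠ 0)
    (hm5 : PySem.Int.mod j 6 ≠ 5) (hne : j ≠ n - 1) : pvG steps n j = [pvMini steps j] := by
  unfold pvG; rw [if_neg hm0, if_neg (fun h => h.elim hm5 hne)]; rfl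

theorem pvG_close (steps : List String) (n j : Int) (hm0 : PySem.Int.mod j 6 ≠ 0)
    (h : PySem.Int.mod j 6 = 5 ∨ j = n - 1) : pvG steps n j = [pvMini steps j, pvFigClose] := by
  unfold pvG; rw [if_neg hm0, if_pos h]; rfl

theorem pyRange6_nil (i n : Int) (h : n ≤ i) : PySem.List.pyRange i n 6 = [] := by
  rw [PySem.List.pyRange_of_pos _ _ (by norm_num)]
  simp [show ¬ i < n by omega]

theorem pyRange6_cons (i n : Int) (h : i < n) :
    PySem.List.pyRange i n 6 = i :: PySem.List.pyRange (i + 6) n 6 := by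
  rw [PySem.List.pyRange_of_pos _ _ (by norm_num : (0:Int) < 6),
      PySem.List.pyRange_of_pos _ _ (by norm_num : (0:Int) < 6)]
  by_cases h6 : i + 6 < n
  · rw [if_pos h, if_pos h6,
      show ((n - i + 6 - 1) / 6).toNat = ((n - (i + 6) + 6 - 1) / 6).toNat + 1 from by omega,
      List.range_succ_eq_map]
    simp only [List.map_cons, List.map_map, Function.comp_def]
    refine List.cons_eq_cons.mpr ⟨by ring, List.map_congr_left fun a _ => by push_cast; ring⟩
  · rw [if_pos h, if_neg (by omega),
      show ((n - i + 6 - 1) / 6).toNat = 1 from by omega]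
    simp

theorem mod6_sub (i j : Int) (hm : PySem.Int.mod i 6 = 0) (h1 : 0 ≤ j - i)
    (h2 : j - i < 6) : PySem.Int.mod j 6 = j - i := by
  rw [PySem.Int.mod_eq_emod_of_pos (by norm_num)] at *
  omega

theorem mod6_next (i : Int) (hm : PySem.Int.mod i 6 = 0) :
    PySem.Int.mod (i + 6) 6 = 0 := by
  rw [PySem.Int.mod_eq_emod_of_pos (by norm_num)] at *
  omega

theorem flatMap_mid (steps : List String) (n : Int) (l : List Int)
    (h : ∀ j ∈ l, pvG steps n j = [pvMini steps j]) :
    l.flatMap (pvG steps n) = l.map (pvMini steps) := by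
  induction l with
  | nil => rfl
  | cons x r ih =>
    simp only [List.flatMap_cons, List.map_cons, h x (by simp),
      ih (fun j hj => h j (by simp [hj]))]
    rfl

theorem chunk_flat (steps : List String) (n i : Int) (h0 : 0 ≤ i)
    (hm : PySem.Int.mod i 6 = 0) (hlt : i < n) :
    (PySem.List.pyRange i (min (i + 6) n) 1).flatMap (pvG steps n)
      = pvFigOpen :: ((PySem.List.pyRange i (min (i + 6) n) 1).map (pvMini steps)) ++ [pvFigClose] := by
  set e := min (i + 6) n with he
  have he1 : i < e := by omega
  have heN : e = n ∨ e = i + 6 := by omega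
  by_cases hc : e = i + 1
  · have hin : i = n - 1 := by omega
    rw [hc, PySem.List.pyRange_one_singleton]
    simp [pvG_open_close steps n i hm hin]
  · have he2 : i + 2 ≤ e := by omega
    have hlastr := PySem.List.pyRange_one_succ_right (a := i+1) (b := e-1) (by omega)
    rw [show e - 1 + 1 = e from by ring] at hlastr
    have hsplit : PySem.List.pyRange i e 1
        = i :: (PySem.List.pyRange (i+1) (e-1) 1 ++ [e-1]) := by
      rw [PySem.List.pyRange_one_cons he1, hlastr]
    rw [hsplit, List.flatMap_cons, List.flatMap_append, List.flatMap_cons, List.flatMap_nil,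
        List.map_cons, List.map_append, List.map_cons, List.map_nil,
        pvG_open steps n i hm (by omega),
        flatMap_mid steps n _ (fun j hj => by
          have hj2 := (PySem.List.mem_pyRange_one).mp hj
          exact pvG_mid steps n j
            (by rw [mod6_sub i j hm (by omega) (by omega)]; omega)
            (by rw [mod6_sub i j hm (by omega) (by omega)]; omega)
            (by omega)),
        pvG_close steps n (e-1)
          (by rw [mod6_sub i (e-1) hm (by omega) (by omega)]; omega)
          (by rcases heN with h | h
              · exact Or.inr (by omega)
              · exact Or.inl (by rw [mod6_sub i (e-1) hm (by omega) (by omega)]; omega))]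
    simp

theorem A_inner (steps : List String) (l : List Int) (a : String) :
    l.foldl (fun acc2 j => acc2 ++ pvMiniPre ++ PySem.List.pyGetD steps j ""
      ++ ";" ++ pvMiniMid ++ PySem.Int.toStr (j + 1) ++ pvMiniPost) a
      = a ++ sCat (l.map (pvMini steps)) := by
  induction l generalizing a with
  | nil => simp [sCat]
  | cons x r ih =>
    rw [List.foldl_cons, ih]
    simp [sCat, pvMini, String.append_assoc]

theorem A_outer (steps : List String) (l : List Int) (a : String) :
    l.foldl (fun acc i =>
      ((PySem.List.pyRange i (min (i + 6) (PySem.List.len steps)) 1).foldl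
        (fun acc2 j => acc2 ++ pvMiniPre ++ PySem.List.pyGetD steps j "" ++ ";"
          ++ pvMiniMid ++ PySem.Int.toStr (j + 1) ++ pvMiniPost) (acc ++ pvFigOpen))
        ++ pvFigClose) a
      = a ++ sCat (l.map (pvChunk steps (PySem.List.len steps))) := by
  induction l generalizing a with
  | nil => simp [sCat]
  | cons x r ih =>
    rw [List.foldl_cons, A_inner, ih]
    simp [sCat, pvChunk, String.append_assoc]

theorem A_eq (steps : List String) :
    generate_latex_document_steps steps
      = pvHeader ++ sCat ((PySem.List.pyRange 0 (PySem.List.len steps) 6).map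
          (pvChunk steps (PySem.List.len steps))) ++ pvFooter := by
  show ((PySem.List.pyRange 0 (PySem.List.len steps) 6).foldl
      (fun acc i =>
        ((PySem.List.pyRange i (min (i + 6) (PySem.List.len steps)) 1).foldl
          (fun acc2 j => acc2 ++ pvMiniPre ++ PySem.List.pyGetD steps j "" ++ ";"
            ++ pvMiniMid ++ PySem.Int.toStr (j + 1) ++ pvMiniPost) (acc ++ pvFigOpen))
          ++ pvFigClose) pvHeader) ++ pvFooter = _
  rw [A_outer]

theorem B_fold (steps : List String) (n : Int) (l : List Int) (ps : List String) :
    l.foldl (fun parts j =>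
      let parts := if PySem.Int.mod j 6 = 0 then parts ++ [pvFigOpen] else parts
      let parts := parts ++ [pvMiniPre ++ PySem.List.pyGetD steps j "" ++ pvMiniMidB
                              ++ PySem.Int.toStr (j + 1) ++ pvMiniPost]
      if PySem.Int.mod j 6 = 5 ∨ j = n - 1 then parts ++ [pvFigClose] else parts) ps
      = ps ++ l.flatMap (pvG steps n) := by
  induction l generalizing ps with
  | nil => simp
  | cons x r ih =>
    rw [List.foldl_cons, ih, List.flatMap_cons]
    dsimp only
    by_cases h5 : PySem.Int.mod x 6 = 5 ∨ x = n - 1 <;>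
      by_cases h0 : PySem.Int.mod x 6 = 0
    · have hlast : x = n - 1 := by
        rcases h5 with h | h
        · rw [h0] at h; exact absurd h (by decide)
        · exact h
      rw [if_pos h5, if_pos h0, pvG_open_close steps n x h0 hlast]
      simp [pvMini, pvMiniMidB, String.append_assoc, List.append_assoc]
    · rw [if_pos h5, if_neg h0, pvG_close steps n x h0 h5]
      simp [pvMini, pvMiniMidB, String.append_assoc, List.append_assoc]
    · rw [if_neg h5, if_pos h0, pvG_open steps n x h0 (fun he => h5 (Or.inr he))]
      simp [pvMini, pvMiniMidB, String.append_assoc, List.append_assoc]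
    · rw [if_neg h5, if_neg h0,
        pvG_mid steps n x h0 (fun h => h5 (Or.inl h)) (fun he => h5 (Or.inr he))]
      simp [pvMini, pvMiniMidB, String.append_assoc, List.append_assoc]

theorem B_eq (steps : List String) :
    generate_latex_document_steps_alt steps
      = pvHeader ++ sCat ((PySem.List.pyRange 0 (PySem.List.len steps) 1).flatMap
          (pvG steps (PySem.List.len steps))) ++ pvFooter := by
  show PySem.Str.join "" (((PySem.List.pyRange 0 (PySem.List.len steps) 1).foldl
      (fun parts j =>
        let parts := if PySem.Int.mod j 6 = 0 then parts ++ [pvFigOpen] else parts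
        let parts := parts ++ [pvMiniPre ++ PySem.List.pyGetD steps j "" ++ pvMiniMidB
                                ++ PySem.Int.toStr (j + 1) ++ pvMiniPost]
        if PySem.Int.mod j 6 = 5 ∨ j = PySem.List.len steps - 1 then parts ++ [pvFigClose]
        else parts) [pvHeader]) ++ [pvFooter]) = _
  rw [B_fold, join_empty_eq_sCat, sCat_append, sCat_append]
  simp [sCat, String.append_assoc]

theorem body_eq (steps : List String) (n : Int) (m : Nat) :
    ∀ i : Int, 0 ≤ i → PySem.Int.mod i 6 = 0 → n ≤ i + m →
      sCat ((PySem.List.pyRange i n 6).map (pvChunk steps n))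
        = sCat ((PySem.List.pyRange i n 1).flatMap (pvG steps n)) := by
  induction m with
  | zero =>
    intro i h0 hm hle
    rw [pyRange6_nil i n (by omega), PySem.List.pyRange_one_eq_nil (by omega)]
    rfl
  | succ m ih =>
    intro i h0 hm hle
    by_cases hlt : i < n
    · have hsp : PySem.List.pyRange i n 1
          = PySem.List.pyRange i (min (i + 6) n) 1 ++ PySem.List.pyRange (min (i + 6) n) n 1 :=
        PySem.List.pyRange_one_append _ _ _ (by omega) (by omega)
      rw [pyRange6_cons i n hlt, List.map_cons, hsp, List.flatMap_append, sCat_append,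
        chunk_flat steps n i h0 hm hlt]
      by_cases h6 : i + 6 ≤ n
      · have hmn : min (i + 6) n = i + 6 := by omega
        rw [hmn]
        simp only [sCat, sCat_append]
        rw [ih (i + 6) (by omega) (mod6_next i hm) (by omega)]
        simp [pvChunk, hmn, sCat, String.append_assoc, String.append_empty]
      · have hmn : min (i + 6) n = n := by omega
        rw [hmn, pyRange6_nil (i + 6) n (by omega),
          PySem.List.pyRange_one_eq_nil (a := n) (b := n) le_rfl]
        simp only [sCat, sCat_append]
        simp [pvChunk, hmn, sCat, String.append_assoc, String.append_empty]
    · rw [pyRange6_nil i n (by omega), PySem.List.pyRange_one_eq_nil (by omega)]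
      rfl

-- ===== VERDICT (by name: the statement is the Claim_ definition above) =====
theorem generate_latex_document_steps_spec : Claim_equal_generate_latex_document_steps := by
  intro steps _
  unfold Spec_generate_latex_document_steps
  rw [A_eq, B_eq, body_eq steps (PySem.List.len steps) steps.length 0 le_rfl (by decide)
    (by simp)]
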